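-- pv_equiv track=rewrite | github.com/accairlines/tapn8n | PPTGeneration/services/pptgeneration/rag/office365_sync.py | _get_email_identifier
-- ===== SOURCE A (Python) =====
-- from typing import List, Dict, Optional, Set
--
-- def _get_email_identifier(email_data: Dict) -> str:
--     """Generate a unique identifier for an email."""
--     # Use message ID if available, otherwise create one from subject and date
--     if email_data.get('message_id'):
--         return email_data['message_id']
--
--     # Create identifier from subject, sender, and date
--     subject = email_data.get('subject', 'No Subject').replace(' ', '_')[:50]
--     sender = email_data.get('from', 'Unknown').replace(' ', '_')
--     date_str = email_data.get('received', '2000-01-01T00:00:00Z')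
--
--     # Sanitize the identifier to be Windows filename safe
--     # Replace colons and other invalid characters
--     identifier = f"{date_str}_{sender}_{subject}"
--     # Replace invalid Windows filename characters
--     invalid_chars = ['<', '>', ':', '"', '|', '?', '*', '\\', '/']
--     for char in invalid_chars:
--         identifier = identifier.replace(char, '_')
--
--     return identifier
-- ===== SOURCE B (Python) =====
-- _BAD = set('<>:"|?*\\/')
--
--
-- def _get_email_identifier(email_data):
--     """Generate a unique identifier for an email."""
--     mid = email_data.get('message_id')
--     if mid:
--         return mid
--     # Single character-level pass: classify each character once while
--     # streaming the three fields into one accumulator.  The subject is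
--     # sliced to 50 chars up front (space->'_' is length-preserving).
--     chars = []
--     for ch in email_data.get('received', '2000-01-01T00:00:00Z'):
--         chars.append('_' if ch in _BAD else ch)
--     chars.append('_')
--     for ch in email_data.get('from', 'Unknown'):
--         chars.append('_' if ch == ' ' or ch in _BAD else ch)
--     chars.append('_')
--     for ch in email_data.get('subject', 'No Subject')[:50]:
--         chars.append('_' if ch == ' ' or ch in _BAD else ch)
--     return ''.join(chars)
-- ===== Notes on version B (the rewrite author's own statement) =====
-- stated objective: alternative
-- what changed: A builds the identifier by staged whole-string passes (per-field space replace, slice, f-string join, then nine full-string replace passes); B streams the three fields through one character-level loop with an accumulator, classifying each character exactly once (field-aware space handling) and slicing the raw subject up front.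
import Mathlib
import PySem

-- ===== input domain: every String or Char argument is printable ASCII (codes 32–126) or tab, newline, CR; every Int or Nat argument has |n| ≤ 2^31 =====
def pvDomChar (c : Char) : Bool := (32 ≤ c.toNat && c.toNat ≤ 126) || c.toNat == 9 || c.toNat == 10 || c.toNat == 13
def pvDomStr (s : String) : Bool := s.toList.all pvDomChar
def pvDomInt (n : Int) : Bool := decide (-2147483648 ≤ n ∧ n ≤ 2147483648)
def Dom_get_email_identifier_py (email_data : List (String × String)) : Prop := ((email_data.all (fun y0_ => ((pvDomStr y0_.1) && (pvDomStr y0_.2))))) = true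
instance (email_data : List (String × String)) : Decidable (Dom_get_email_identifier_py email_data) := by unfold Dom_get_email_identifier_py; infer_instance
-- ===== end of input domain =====

-- B replaces A's staged whole-string passes (replace/slice/join then nine replace passes) by one
-- character-level streaming pass with an accumulator; objective: alternative, same result.

-- ===== PORT A =====
def get_email_identifier_py (email_data : List (String × String)) : String :=
  let d := PySem.Dict.mk email_data
  let mid := (d.get? "message_id").getD ""
  if mid ≠ "" then mid
  else
    let subject := PySem.Str.slice (PySem.Str.replace (d.getD "subject" "No Subject") " " "_") none (some 50)
    let sender := PySem.Str.replace (d.getD "from" "Unknown") " " "_"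
    let date_str := d.getD "received" "2000-01-01T00:00:00Z"
    let identifier := date_str ++ "_" ++ sender ++ "_" ++ subject
    ["<", ">", ":", "\"", "|", "?", "*", "\\", "/"].foldl
      (fun s c => PySem.Str.replace s c "_") identifier

-- ===== PORT B =====
-- the set of invalid Windows filename characters, built once (Source B's _BAD)
def pvBadSet : PySem.Set Char := PySem.Set.ofList "<>:\"|?*\\/".toList

def get_email_identifier_py_alt (email_data : List (String × String)) : String :=
  let d := PySem.Dict.mk email_data
  let mid := (d.get? "message_id").getD ""
  if mid ≠ "" then mid
  else
    -- single character-level pass appending to an accumulator, field by field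
    let chars := (d.getD "received" "2000-01-01T00:00:00Z").toList.foldl
      (fun acc ch => acc ++ [if PySem.Set.contains pvBadSet ch then '_' else ch]) []
    let chars := chars ++ ['_']
    let chars := (d.getD "from" "Unknown").toList.foldl
      (fun acc ch => acc ++ [if ch = ' ' || PySem.Set.contains pvBadSet ch then '_' else ch]) chars
    let chars := chars ++ ['_']
    let chars := (PySem.Str.slice (d.getD "subject" "No Subject") none (some 50)).toList.foldl
      (fun acc ch => acc ++ [if ch = ' ' || PySem.Set.contains pvBadSet ch then '_' else ch]) chars
    String.ofList chars

-- ===== PRECONDITION & SPEC =====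
def Spec_get_email_identifier_py (email_data : List (String × String)) (out : String) : Prop := out = get_email_identifier_py_alt email_data
instance (email_data : List (String × String)) (out : String) : Decidable (Spec_get_email_identifier_py email_data out) := by unfold Spec_get_email_identifier_py; infer_instance

-- ===== CLAIM (what is proved, stated in full; the proofs are below) =====
def Claim_equal_get_email_identifier_py : Prop := ∀ (email_data : List (String × String)), Dom_get_email_identifier_py email_data → Spec_get_email_identifier_py email_data (get_email_identifier_py email_data)

-- ===== LEMMAS AND PROOFS =====

-- single-character str.replace is a character map
lemma replace_go_single (c r : Char) :
    ∀ (l : List Char) (fuel : Nat) (acc : List Char), l.length ≤ fuel →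
    PySem.Chars.replace.go [c] [r] fuel l acc
      = acc.reverse ++ l.map (fun x => if x = c then r else x) := by
  intro l
  induction l with
  | nil => intro fuel acc _; cases fuel <;> simp [PySem.Chars.replace.go]
  | cons a t ih =>
    intro fuel acc h
    cases fuel with
    | zero => simp at h
    | succ f =>
      simp only [PySem.Chars.replace.go, List.isPrefixOf, List.length_cons] at *
      by_cases hac : c = a
      · subst hac
        have hb : ((c == c) && true) = true := by simp
        rw [hb]
        simp only [if_true, List.length_nil, Nat.zero_add, List.drop_succ_cons,
          List.drop_zero]
        rw [ih f (([r].reverse) ++ acc) (by omega)]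
        simp
      · have hb : ((c == a) && true) = false := by simp [hac]
        rw [hb]
        simp only [Bool.false_eq_true, if_false]
        rw [ih f (a :: acc) (by omega)]
        simp
        intro hh; exact absurd hh.symm hac

lemma replace_single (cs : List Char) (c r : Char) :
    PySem.Chars.replace cs [c] [r] = cs.map (fun x => if x = c then r else x) := by
  rw [PySem.Chars.replace]
  simp only [List.isEmpty_cons, Bool.false_eq_true, if_false]
  exact (replace_go_single c r cs cs.length [] le_rfl).trans (by simp)

-- folding single-char substitutions over a list of target characters, at the char-list level
lemma subst_fold (cs : List Char) :
    ∀ (L : List Char), ('_' : Char) ∉ cs →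
    cs.foldl (fun L c => L.map (fun x => if x = c then '_' else x)) L
      = L.map (fun x => if x ∈ cs then '_' else x) := by
  induction cs with
  | nil => intro L _; simp
  | cons c t ih =>
    intro L h
    have hus : ('_' : Char) ∉ t := fun hm => h (List.mem_cons_of_mem _ hm)
    simp only [List.foldl_cons]
    rw [ih _ hus, List.map_map]
    apply List.map_congr_left
    intro x _
    by_cases hc : x = c
    · subst hc
      simp [hus]
    · simp [hc, List.mem_cons]

-- A's foldl of single-character string replaces, read through toList
lemma str_fold (cs : List Char) :
    ∀ (s : String),
    ((cs.map (fun c => String.ofList [c])).foldl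
        (fun s c => PySem.Str.replace s c "_") s).toList
      = cs.foldl (fun L c => L.map (fun x => if x = c then '_' else x)) s.toList := by
  induction cs with
  | nil => intro s; simp
  | cons c t ih =>
    intro s
    simp only [List.map_cons, List.foldl_cons, ih]
    congr 1
    rw [PySem.Str.toList_replace, String.toList_ofList]
    have h0 : ("_" : String).toList = ['_'] := by decide
    rw [h0, replace_single]

-- B's append-accumulator loop is a map
lemma foldl_app {f : Char → Char} :
    ∀ (l acc : List Char),
    l.foldl (fun acc ch => acc ++ [f ch]) acc = acc ++ l.map f := by
  intro l
  induction l with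
  | nil => simp
  | cons a t ih => intro acc; simp [ih]

-- the bad-character set, as a concrete list
lemma pvBadSet_eq : pvBadSet = ['<', '>', ':', '"', '|', '?', '*', '\\', '/'] := by decide

-- ===== VERDICT (by name: the statement is the Claim_ definition above) =====
set_option maxHeartbeats 1600000 in
theorem get_email_identifier_py_spec : Claim_equal_get_email_identifier_py := by
  intro ed _
  unfold Spec_get_email_identifier_py get_email_identifier_py get_email_identifier_py_alt
  by_cases h : ((PySem.Dict.mk ed).get? "message_id").getD "" ≠ ""
  · rw [if_pos h, if_pos h]
  · rw [if_neg h, if_neg h]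
    apply String.toList_inj.mp
    set bad : List Char := ['<', '>', ':', '"', '|', '?', '*', '\\', '/'] with hbad
    -- A's result as a character map over the joined identifier
    have hlist : (["<", ">", ":", "\"", "|", "?", "*", "\\", "/"] : List String)
        = bad.map (fun c => String.ofList [c]) := by decide
    rw [hlist, str_fold, subst_fold _ _ (by decide)]
    -- turn both sides into explicit char lists
    have h0 : ("_" : String).toList = ['_'] := by decide
    have hsp : ∀ s : String, (PySem.Str.replace s " " "_").toList
        = s.toList.map (fun x => if x = ' ' then '_' else x) := by
      intro s
      rw [PySem.Str.toList_replace]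
      have h1 : (" " : String).toList = [' '] := by decide
      rw [h1, h0, replace_single]
    have hs50 : ∀ (l : List Char), PySem.List.slice l none (some 50) = l.take 50 := by
      intro l
      rw [show ((50:Int)) = ((50:Nat):Int) by norm_num, PySem.List.slice_to_natCast]
    simp only [String.toList_append, String.toList_ofList, h0,
      PySem.Str.toList_slice, PySem.Chars.slice_eq_listSlice, foldl_app, pvBadSet_eq, ← hbad,
      hsp, hs50]
    -- bad-set membership as Bool vs Prop
    have hmem : ∀ c : Char, PySem.Set.contains bad c = decide (c ∈ bad) := by
      intro c
      simp [PySem.Set.contains]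
    -- B's per-character classifiers equal A's substitution (composed with the space map)
    have hf1 : (fun ch => if PySem.Set.contains bad ch = true then '_' else ch)
        = (fun x : Char => if x ∈ bad then '_' else x) := by
      funext x; rw [hmem]; simp
    have hf2 : (fun ch => if (decide (ch = ' ') || PySem.Set.contains bad ch) = true then '_' else ch)
        = ((fun x : Char => if x ∈ bad then '_' else x) ∘ (fun x => if x = ' ' then '_' else x)) := by
      funext x
      by_cases hx : x = ' '
      · subst hx; simp [hbad]
      · by_cases hb : x ∈ bad <;> simp [Function.comp, hx, hb]
    simp only [hf1, hf2, List.map_append, List.map_map, List.map_take, List.map_cons,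
      List.nil_append, List.append_assoc, List.cons_append]
    simp [hbad]
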